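-- pv_equiv track=rewrite | github.com/e-vergo/TDCSG | scripts/restore_needed_declarations.py | uncomment_region
-- ===== SOURCE A (Python) =====
-- from typing import List, Dict
--
-- def uncomment_region(lines: List[str], opening: int, closing: int) -> List[str]:
--     """
--     Remove line-by-line comment markers, restoring original code.
--
--     Returns: Modified lines with comments removed
--     """
--     result = []
--
--     for i, line in enumerate(lines):
--         if i == opening:
--             # Skip marker line
--             continue
--         elif i > opening and i <= closing:
--             # Uncomment this line
--             stripped = line.lstrip()
--             if stripped.startswith('-- '):
--                 # Remove the '-- ' prefix, preserving indentation
--                 indent_size = len(line) - len(stripped)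
--                 uncommented = ' ' * indent_size + stripped[3:]  # Remove '-- '
--                 result.append(uncommented)
--             else:
--                 # Line wasn't commented (empty or something else), keep as-is
--                 result.append(line)
--         else:
--             # Not in commented region
--             result.append(line)
--
--     return result
-- ===== SOURCE B (Python) =====
-- def _strip_marker(line):
--     stripped = line.lstrip()
--     if stripped.startswith('-- '):
--         return ' ' * (len(line) - len(stripped)) + stripped[3:]
--     return line
--
--
-- def uncomment_region(lines, opening, closing):
--     n = len(lines)
--     lo = max(opening + 1, 0)
--     hi = max(min(closing + 1, n), lo)
--     head = lines[:max(opening, 0)]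
--     return head + [_strip_marker(l) for l in lines[lo:hi]] + lines[hi:]
-- ===== Notes on version B (the rewrite author's own statement) =====
-- stated objective: alternative
-- what changed: Replaces A's per-index enumerate loop with branch tests against opening/closing by a split-map-concatenate structure: clamp the region bounds once, keep the head slice, map a small prefix-stripping helper over the region slice, and append the tail slice unchanged.
import Mathlib
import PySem

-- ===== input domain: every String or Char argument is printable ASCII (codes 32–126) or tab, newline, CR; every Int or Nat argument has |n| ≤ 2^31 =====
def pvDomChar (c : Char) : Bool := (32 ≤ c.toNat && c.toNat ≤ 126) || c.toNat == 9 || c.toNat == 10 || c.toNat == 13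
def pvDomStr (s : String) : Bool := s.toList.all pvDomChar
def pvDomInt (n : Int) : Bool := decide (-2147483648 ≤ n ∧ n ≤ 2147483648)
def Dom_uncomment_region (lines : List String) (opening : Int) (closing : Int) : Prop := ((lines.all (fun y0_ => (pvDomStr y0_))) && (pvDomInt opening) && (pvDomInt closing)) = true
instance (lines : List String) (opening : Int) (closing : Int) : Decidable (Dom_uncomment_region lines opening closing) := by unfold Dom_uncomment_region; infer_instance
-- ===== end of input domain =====

-- B replaces A's per-index branch loop by clamped bounds + slice/map/concatenate (alternative decomposition, same cost).

-- ===== PORT A =====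
-- literal transliteration of A: for i, line in enumerate(lines), the three index branches, appending to result
def uncomment_region (lines : List String) (opening : Int) (closing : Int) : List String :=
  (PySem.List.enumerate lines 0).foldl (fun result p =>
    if p.1 = opening then
      result
    else if opening < p.1 ∧ p.1 ≤ closing then
      let stripped := PySem.Chars.lstrip p.2.toList
      if PySem.Chars.startswith stripped ("-- ".toList) then
        let indent_size : Int := (p.2.toList.length : Int) - (stripped.length : Int)
        let uncommented := String.ofList (PySem.List.pyRepeat [' '] indent_size ++ PySem.List.slice stripped (some 3) none)
        result ++ [uncommented]
      else
        result ++ [p.2]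
    else
      result ++ [p.2]) []

-- ===== PORT B =====
-- helper _strip_marker from Source B
def stripMarker (line : String) : String :=
  let stripped := PySem.Chars.lstrip line.toList
  if PySem.Chars.startswith stripped ("-- ".toList) then
    String.ofList (List.replicate (line.toList.length - stripped.length) ' ' ++ stripped.drop 3)
  else line

-- Source B: clamp the region bounds once, then head slice ++ map helper over region slice ++ tail slice
def uncomment_region_alt (lines : List String) (opening : Int) (closing : Int) : List String :=
  let n : Int := (lines.length : Int)
  let lo := max (opening + 1) 0
  let hi := max (min (closing + 1) n) lo
  PySem.List.slice lines none (some (max opening 0))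
    ++ (PySem.List.slice lines (some lo) (some hi)).map stripMarker
    ++ PySem.List.slice lines (some hi) none

-- ===== PRECONDITION & SPEC =====
def Spec_uncomment_region (lines : List String) (opening : Int) (closing : Int) (out : List String) : Prop := out = uncomment_region_alt lines opening closing
instance (lines : List String) (opening : Int) (closing : Int) (out : List String) : Decidable (Spec_uncomment_region lines opening closing out) := by unfold Spec_uncomment_region; infer_instance

-- ===== CLAIM (what is proved, stated in full; the proofs are below) =====
def Claim_equal_uncomment_region : Prop := ∀ (lines : List String) (opening : Int) (closing : Int), Dom_uncomment_region lines opening closing → Spec_uncomment_region lines opening closing (uncomment_region lines opening closing)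

-- ===== LEMMAS AND PROOFS =====

-- A's inline marker-stripping expression computes B's helper stripMarker
lemma stripMarker_eq (line : String) :
    (if PySem.Chars.startswith (PySem.Chars.lstrip line.toList) ("-- ".toList) then
      String.ofList (PySem.List.pyRepeat [' '] ((line.toList.length : Int) - ((PySem.Chars.lstrip line.toList).length : Int))
        ++ PySem.List.slice (PySem.Chars.lstrip line.toList) (some 3) none)
    else line) = stripMarker line := by
  simp only [stripMarker]
  split_ifs with h
  · rw [PySem.List.pyRepeat_singleton]
    simp only [PySem.List.slice_from _ (by norm_num : (0:Int) ≤ 3)]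
    congr 2
    · congr 1; omega
  · rfl

-- reference recursion that both programs satisfy (indices relative: the head's index is 0)
def specF : List String → Int → Int → List String
  | [], _, _ => []
  | x :: xs, o, c =>
    (if o = 0 then [] else if o < 0 ∧ 0 ≤ c then [stripMarker x] else [x]) ++ specF xs (o - 1) (c - 1)

-- A's loop, started at index s with accumulator acc, appends specF of the shifted bounds
lemma A_fold (lines : List String) (o c : Int) : ∀ (s : Int) (acc : List String),
    (PySem.List.enumerate lines s).foldl (fun result p =>
      if p.1 = o then
        result
      else if o < p.1 ∧ p.1 ≤ c then
        let stripped := PySem.Chars.lstrip p.2.toList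
        if PySem.Chars.startswith stripped ("-- ".toList) then
          let indent_size : Int := (p.2.toList.length : Int) - (stripped.length : Int)
          let uncommented := String.ofList (PySem.List.pyRepeat [' '] indent_size ++ PySem.List.slice stripped (some 3) none)
          result ++ [uncommented]
        else
          result ++ [p.2]
      else
        result ++ [p.2]) acc = acc ++ specF lines (o - s) (c - s) := by
  induction lines generalizing o c with
  | nil => intro s acc; simp [PySem.List.enumerate_nil, specF]
  | cons x xs ih =>
    intro s acc
    rw [PySem.List.enumerate_cons, List.foldl_cons, ih]
    have hs : o - (s + 1) = o - s - 1 := by ring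
    have hc2 : c - (s + 1) = c - s - 1 := by ring
    rw [hs, hc2, show specF (x :: xs) (o - s) (c - s) =
      (if o - s = 0 then [] else if o - s < 0 ∧ 0 ≤ c - s then [stripMarker x] else [x]) ++ specF xs (o - s - 1) (c - s - 1) from rfl]
    by_cases hA : s = o
    · simp [hA]
    · by_cases hB : o < s ∧ s ≤ c
      · simp only [if_neg hA, if_pos hB, if_neg (by omega : ¬ o - s = 0),
          if_pos (by omega : o - s < 0 ∧ 0 ≤ c - s)]
        rw [← stripMarker_eq x]
        split_ifs <;> simp
      · simp only [if_neg hA, if_neg hB, if_neg (by omega : ¬ o - s = 0),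
          if_neg (by omega : ¬ (o - s < 0 ∧ 0 ≤ c - s))]
        simp

-- B's slice/map/concatenate satisfies the same head-and-tail recursion
lemma alt_cons (x : String) (xs : List String) (o c : Int) :
    uncomment_region_alt (x :: xs) o c =
      (if o = 0 then [] else if o < 0 ∧ 0 ≤ c then [stripMarker x] else [x]) ++ uncomment_region_alt xs (o - 1) (c - 1) := by
  simp only [uncomment_region_alt]
  rw [PySem.List.slice_to _ (by omega), PySem.List.slice_to _ (by omega),
      PySem.List.slice_toNat _ (by omega) (by omega), PySem.List.slice_toNat _ (by omega) (by omega),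
      PySem.List.slice_from _ (by omega), PySem.List.slice_from _ (by omega)]
  push_cast [List.length_cons]
  rcases lt_trichotomy o 0 with h1 | h0 | h2
  · -- o < 0
    have e1 : (max o 0).toNat = 0 := by omega
    have e2 : (max (o + 1) 0).toNat = 0 := by omega
    have e1' : (max (o - 1) 0).toNat = 0 := by omega
    have e2' : (max (o - 1 + 1) 0).toNat = 0 := by omega
    by_cases hc : 0 ≤ c
    · have e3 : (max (min (c + 1) ((xs.length : Int) + 1)) (max (o + 1) 0)).toNat
          = (max (min (c - 1 + 1) (xs.length : Int)) (max (o - 1 + 1) 0)).toNat + 1 := by omega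
      rw [e1, e2, e1', e2', e3]
      simp [List.take_succ_cons, List.drop_succ_cons, show ¬ o = 0 by omega, show o < 0 ∧ 0 ≤ c by omega]
    · have e3 : (max (min (c + 1) ((xs.length : Int) + 1)) (max (o + 1) 0)).toNat = 0 := by omega
      have e3' : (max (min (c - 1 + 1) (xs.length : Int)) (max (o - 1 + 1) 0)).toNat = 0 := by omega
      rw [e1, e2, e1', e2', e3, e3']
      simp [show ¬ o = 0 by omega, show ¬ (o < 0 ∧ 0 ≤ c) by omega]
  · -- o = 0
    subst h0
    have e3 : (max (min (c + 1) ((xs.length : Int) + 1)) (max ((0:Int) + 1) 0)).toNat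
        = (max (min (c - 1 + 1) (xs.length : Int)) (max ((0:Int) - 1 + 1) 0)).toNat + 1 := by omega
    rw [e3]
    norm_num [List.take_succ_cons, List.drop_succ_cons]
  · -- 0 < o
    have e1 : (max o 0).toNat = (max (o - 1) 0).toNat + 1 := by omega
    have e2 : (max (o + 1) 0).toNat = (max (o - 1 + 1) 0).toNat + 1 := by omega
    have e3 : (max (min (c + 1) ((xs.length : Int) + 1)) (max (o + 1) 0)).toNat
        = (max (min (c - 1 + 1) (xs.length : Int)) (max (o - 1 + 1) 0)).toNat + 1 := by omega
    rw [e1, e2, e3]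
    simp [List.take_succ_cons, List.drop_succ_cons, Nat.add_sub_add_right,
      show ¬ o = 0 by omega, show ¬ (o < 0 ∧ 0 ≤ c) by omega]

lemma alt_eq_spec (lines : List String) : ∀ (o c : Int), uncomment_region_alt lines o c = specF lines o c := by
  induction lines with
  | nil =>
    intro o c
    simp [uncomment_region_alt, specF, PySem.List.slice]
  | cons x xs ih =>
    intro o c
    rw [alt_cons, ih]
    rfl

-- ===== VERDICT (by name: the statement is the Claim_ definition above) =====
theorem uncomment_region_spec : Claim_equal_uncomment_region := by
  intro lines o c _
  unfold Spec_uncomment_region uncomment_region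
  rw [alt_eq_spec]
  simpa using A_fold lines o c 0 []
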